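-- pv_equiv track=rewrite | github.com/brittonsmith/cloudy_cooling_tools | cloudy_grids/utilities.py | get_grid_indices
-- ===== SOURCE A (Python) =====
-- def get_grid_indices(dims,index):
--     "Return indices with shape of dims corresponding to scalar index."
--     indices = []
--     dims.reverse()
--     for dim in dims:
--         indices.append(index % dim)
--         index -= indices[-1]
--         index //= dim
--
--     dims.reverse()
--     indices.reverse()
--     return indices
-- ===== SOURCE B (Python) =====
-- def get_grid_indices(dims, index):
--     "Return indices with shape of dims corresponding to scalar index."
--     strides = []
--     p = 1
--     for d in reversed(dims):
--         strides.append(p)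
--         p *= d
--     strides.reverse()
--     return [(index // s) % d for d, s in zip(dims, strides)]
-- ===== Notes on version B (the rewrite author's own statement) =====
-- stated objective: alternative
-- what changed: Replaces A's sequential carry chain (repeated divmod that threads the shrinking quotient through the loop) with a staged stride computation: one reverse pass builds the suffix-product stride of each axis, then each index is computed independently as (index // stride) % dim, with no mutation of dims and no running quotient.
-- outside the precondition, e.g. on get_grid_indices([2, 0], 5): A raises ZeroDivisionError, B raises ZeroDivisionError; on get_grid_indices([3, -3, 2, 5], 37): A returns [2, 0, 1, 2], B returns [1, 0, 1, 2]
import Mathlib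
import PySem

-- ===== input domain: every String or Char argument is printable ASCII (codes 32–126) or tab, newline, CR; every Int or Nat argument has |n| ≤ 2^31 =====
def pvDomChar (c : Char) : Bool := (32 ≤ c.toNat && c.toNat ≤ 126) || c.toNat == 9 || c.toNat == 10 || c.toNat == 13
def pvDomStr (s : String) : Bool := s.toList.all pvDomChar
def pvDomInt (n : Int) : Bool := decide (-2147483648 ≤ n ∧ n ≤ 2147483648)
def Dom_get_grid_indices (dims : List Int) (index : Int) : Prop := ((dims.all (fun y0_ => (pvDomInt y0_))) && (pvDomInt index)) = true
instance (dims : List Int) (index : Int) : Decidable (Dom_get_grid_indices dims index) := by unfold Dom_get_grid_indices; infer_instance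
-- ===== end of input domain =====

-- B replaces A's carry chain (threading the shrinking quotient through a divmod loop) by a staged
-- stride computation: a reverse pass of suffix products, then each index independently as
-- (index // stride) % dim (alternative decomposition, no mutation of dims). A reverses dims in
-- place but reverses it back before returning, so the return value is the whole observable effect.

-- ===== PORT A =====
-- dims.reverse(); for dim in dims: indices.append(index % dim); index = (index - indices[-1]) // dim;
-- dims.reverse(); indices.reverse()
def get_grid_indices (dims : List Int) (index : Int) : List Int :=
  (dims.reverse.foldl (fun (s : List Int × Int) dim =>
      let r := PySem.Int.mod s.2 dim
      let idx := PySem.Int.floordiv (s.2 - r) dim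
      (s.1 ++ [r], idx)) ([], index)).1.reverse

-- ===== PORT B =====
-- strides = []; p = 1; for d in reversed(dims): strides.append(p); p *= d
def get_grid_indices_alt_strides (dims : List Int) : List Int :=
  ((dims.reverse.foldl (fun (s : List Int × Int) d => (s.1 ++ [s.2], s.2 * d)) ([], 1)).1).reverse

-- [(index // s) % d for d, s in zip(dims, strides)]
def get_grid_indices_alt (dims : List Int) (index : Int) : List Int :=
  (dims.zip (get_grid_indices_alt_strides dims)).map
    (fun p => PySem.Int.mod (PySem.Int.floordiv index p.2) p.1)

-- ===== PRECONDITION & SPEC =====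
-- Pre_ excludes dims containing a zero (Python A raises ZeroDivisionError there, and B raises too)
-- and dims containing a negative entry: a negative grid dimension is meaningless, and there A's
-- nested floor-divisions and B's stride formula return different, equally accidental values.
def Pre_get_grid_indices (dims : List Int) (index : Int) : Prop := ∀ d ∈ dims, 0 < d
instance (dims : List Int) (index : Int) : Decidable (Pre_get_grid_indices dims index) := by
  unfold Pre_get_grid_indices; infer_instance
def pvWitness_get_grid_indices : List Int × Int := ([3, 4, 5], 37)

def Spec_get_grid_indices (dims : List Int) (index : Int) (out : List Int) : Prop := out = get_grid_indices_alt dims index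
instance (dims : List Int) (index : Int) (out : List Int) : Decidable (Spec_get_grid_indices dims index out) := by unfold Spec_get_grid_indices; infer_instance

-- ===== CLAIM (what is proved, stated in full; the proofs are below) =====
def Claim_equal_get_grid_indices : Prop := ∀ (dims : List Int) (index : Int), Dom_get_grid_indices dims index → Pre_get_grid_indices dims index → Spec_get_grid_indices dims index (get_grid_indices dims index)

-- ===== LEMMAS AND PROOFS =====

-- digits A produces over the (already reversed) dims, before the final reverse
def gA : List Int → Int → List Int
  | [], _ => []
  | d :: t, idx =>
    let r := PySem.Int.mod idx d
    r :: gA t (PySem.Int.floordiv (idx - r) d)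

theorem foldA (l : List Int) (acc : List Int) (idx : Int) :
    (l.foldl (fun (s : List Int × Int) dim =>
      let r := PySem.Int.mod s.2 dim
      let idx := PySem.Int.floordiv (s.2 - r) dim
      (s.1 ++ [r], idx)) (acc, idx)).1 = acc ++ gA l idx := by
  induction l generalizing acc idx with
  | nil => simp [gA]
  | cons d t ih => simp [gA, ih, List.foldl_cons]

theorem fdiv_sub_mod (idx d : Int) (hd : d ≠ 0) :
    PySem.Int.floordiv (idx - PySem.Int.mod idx d) d = PySem.Int.floordiv idx d := by
  have h1 : idx - PySem.Int.mod idx d = PySem.Int.floordiv idx d * d := by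
    have := PySem.Int.floordiv_mul_add_mod idx d
    omega
  rw [h1]
  have h2 : PySem.Int.mod (PySem.Int.floordiv idx d * d) d = 0 :=
    (PySem.Int.mod_eq_zero_iff_dvd _ _).mpr ⟨_, mul_comm _ _⟩
  have h3 := PySem.Int.floordiv_mul_add_mod (PySem.Int.floordiv idx d * d) d
  rw [h2, add_zero] at h3
  exact mul_right_cancel₀ hd h3

-- nested floor division = division by the product (positive divisors)
theorem fdiv_fdiv (a x p : Int) (hx : 0 < x) (hp : 0 < p) :
    PySem.Int.floordiv (PySem.Int.floordiv a x) p = PySem.Int.floordiv a (x * p) := by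
  rw [PySem.Int.floordiv_eq_ediv_of_pos hx, PySem.Int.floordiv_eq_ediv_of_pos hp,
    PySem.Int.floordiv_eq_ediv_of_pos (mul_pos hx hp)]
  exact Int.ediv_ediv_of_nonneg (le_of_lt hx)

-- the quotient chain of gA over xs lands at index // prod xs
theorem gA_append (xs : List Int) (d idx : Int) (hxs : ∀ x ∈ xs, 0 < x) :
    gA (xs ++ [d]) idx
      = gA xs idx ++ [PySem.Int.mod (PySem.Int.floordiv idx xs.prod) d] := by
  induction xs generalizing idx with
  | nil =>
    simp [gA, PySem.Int.floordiv]
  | cons x t ih =>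
    have hx : 0 < x := hxs x (by simp)
    have ht : ∀ y ∈ t, 0 < y := fun y hy => hxs y (by simp [hy])
    have hp : 0 < t.prod := List.prod_pos ht
    simp only [List.cons_append, gA]
    rw [fdiv_sub_mod _ _ (ne_of_gt hx), ih _ ht, fdiv_fdiv _ _ _ hx hp]
    simp

-- suffix products
def sufProd : List Int → List Int
  | [] => []
  | _ :: t => t.prod :: sufProd t

-- the prefix-product scan the strides loop builds
def ppScan : List Int → Int → List Int
  | [], _ => []
  | d :: t, p => p :: ppScan t (p * d)

theorem foldStrides (l : List Int) (acc : List Int) (p : Int) :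
    (l.foldl (fun (s : List Int × Int) d => (s.1 ++ [s.2], s.2 * d)) (acc, p)).1
      = acc ++ ppScan l p := by
  induction l generalizing acc p with
  | nil => simp [ppScan]
  | cons d t ih => simp [ppScan, ih, List.foldl_cons]

theorem ppScan_append (xs : List Int) (d p : Int) :
    ppScan (xs ++ [d]) p = ppScan xs p ++ [p * xs.prod] := by
  induction xs generalizing p with
  | nil => simp [ppScan]
  | cons x t ih => simp [ppScan, ih, mul_assoc]

theorem strides_eq (dims : List Int) :
    get_grid_indices_alt_strides dims = sufProd dims := by
  induction dims with
  | nil => simp [get_grid_indices_alt_strides, sufProd]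
  | cons d t ih =>
    unfold get_grid_indices_alt_strides at *
    rw [foldStrides] at *
    simp only [List.nil_append] at *
    simp only [List.reverse_cons, ppScan_append, List.reverse_append, sufProd]
    simp [ih, List.prod_reverse]

theorem main_eq (dims : List Int) (idx : Int) (hpos : ∀ d ∈ dims, 0 < d) :
    (gA dims.reverse idx).reverse
      = (dims.zip (sufProd dims)).map
          (fun p => PySem.Int.mod (PySem.Int.floordiv idx p.2) p.1) := by
  induction dims generalizing idx with
  | nil => simp [gA]
  | cons d t ih =>
    have ht : ∀ y ∈ t, 0 < y := fun y hy => hpos y (by simp [hy])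
    have htr : ∀ y ∈ t.reverse, 0 < y := by simpa using ht
    simp only [List.reverse_cons, gA_append _ _ _ htr, List.reverse_append,
      List.reverse_cons, List.reverse_nil, List.nil_append, List.singleton_append,
      sufProd, List.zip_cons_cons, List.map_cons, List.prod_reverse]
    rw [ih _ ht]

-- ===== VERDICT (by name: the statement is the Claim_ definition above) =====
theorem get_grid_indices_spec : Claim_equal_get_grid_indices := by
  intro dims index _ hpre
  unfold Spec_get_grid_indices get_grid_indices get_grid_indices_alt
  rw [foldA, List.nil_append, strides_eq, main_eq dims index hpre]
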